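-- pv_equiv track=rewrite | github.com/taufique71/pamcon | distances.py | split_joint_distance
-- ===== SOURCE A (Python) =====
-- def split_joint_distance(A, B):
--     n = 0
--     C = []
--     for a in A:
--         n = n + len(a)
--         for b in B:
--             set_a = set(a)
--             set_b = set(b)
--             isec = set_a.intersection(set_b)
--             if len(isec) != 0:
--                 C.append(list(isec))
--
--     proj_A_B = 0
--     for a in A:
--         max_isec_card = 0
--         for c in C:
--             set_a = set(a)
--             set_c = set(c)
--             isec = set_a.intersection(set_c)
--             if len(isec) > max_isec_card:
--                 max_isec_card = len(isec)
--         proj_A_B = proj_A_B + max_isec_card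
--
--     proj_B_A = 0
--     for b in B:
--         max_isec_card = 0
--         for c in C:
--             set_b = set(b)
--             set_c = set(c)
--             isec = set_b.intersection(set_c)
--             if len(isec) > max_isec_card:
--                 max_isec_card = len(isec)
--         proj_B_A = proj_B_A + max_isec_card
--
--     dist_A_B = 2 * n - proj_A_B - proj_B_A
--     return dist_A_B
-- ===== SOURCE B (Python) =====
-- def split_joint_distance(A, B):
--     # Direct projection: no intermediate list of all pairwise intersections.
--     def proj(X, Y):
--         total = 0
--         for x in X:
--             sx = set(x)
--             total += max((len(sx & set(y)) for y in Y), default=0)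
--         return total
--     n = sum(len(a) for a in A)
--     return 2 * n - proj(A, B) - proj(B, A)
-- ===== Notes on version B (the rewrite author's own statement) =====
-- stated objective: faster
-- what changed: B drops A's intermediate list C of all pairwise cluster intersections (and the three scans over it) and projects each cluster directly onto the other partition, taking max over pairwise intersection sizes in a single pass; equality rests on the lemma that the best overlap with any element of C equals the best overlap with the other partition itself.
import Mathlib
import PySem

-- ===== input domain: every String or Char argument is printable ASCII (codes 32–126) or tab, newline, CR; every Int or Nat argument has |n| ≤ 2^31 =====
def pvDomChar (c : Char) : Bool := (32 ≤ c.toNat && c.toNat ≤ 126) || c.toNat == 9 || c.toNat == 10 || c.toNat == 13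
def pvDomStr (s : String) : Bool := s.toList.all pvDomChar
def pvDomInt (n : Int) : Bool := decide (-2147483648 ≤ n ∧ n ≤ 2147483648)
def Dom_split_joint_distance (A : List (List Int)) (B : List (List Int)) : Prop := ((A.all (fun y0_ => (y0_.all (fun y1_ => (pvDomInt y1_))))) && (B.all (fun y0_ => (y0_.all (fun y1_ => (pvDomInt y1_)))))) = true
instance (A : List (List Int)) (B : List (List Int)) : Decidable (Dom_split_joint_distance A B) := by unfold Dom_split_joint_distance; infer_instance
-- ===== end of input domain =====

-- B drops A's intermediate list C of all pairwise intersections and projects each cluster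
-- directly onto the other partition (objective: faster, asymptotically fewer intersections).

-- ===== PORT A =====
-- Python's `C.append(list(isec))` lists a set in hash order; C's entries are only ever consumed
-- as set(c) and via intersection cardinalities, which are order-independent, so storing the
-- PySem.Set itself is exact.
def split_joint_distance (A : List (List Int)) (B : List (List Int)) : Int :=
  let nC : Int × List (List Int) :=
    A.foldl (fun st a =>
      let st := (st.1 + (a.length : Int), st.2)
      B.foldl (fun st b =>
        let set_a := PySem.Set.ofList a
        let set_b := PySem.Set.ofList b
        let isec := PySem.Set.inter set_a set_b
        if isec.length ≠ 0 then (st.1, st.2 ++ [isec]) else st) st) ((0 : Int), [])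
  let n := nC.1
  let C := nC.2
  let proj_A_B : Int :=
    A.foldl (fun p a =>
      p + C.foldl (fun m c =>
        let set_a := PySem.Set.ofList a
        let set_c := PySem.Set.ofList c
        let isec := PySem.Set.inter set_a set_c
        if (isec.length : Int) > m then (isec.length : Int) else m) (0 : Int)) (0 : Int)
  let proj_B_A : Int :=
    B.foldl (fun p b =>
      p + C.foldl (fun m c =>
        let set_b := PySem.Set.ofList b
        let set_c := PySem.Set.ofList c
        let isec := PySem.Set.inter set_b set_c
        if (isec.length : Int) > m then (isec.length : Int) else m) (0 : Int)) (0 : Int)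
  2 * n - proj_A_B - proj_B_A

-- ===== PORT B =====
-- `max(gen, default=0)` over non-negative values is exactly `foldl max 0` over the same values.
def pvProj (X : List (List Int)) (Y : List (List Int)) : Int :=
  X.foldl (fun total x =>
    let sx := PySem.Set.ofList x
    total + (Y.map (fun y => ((PySem.Set.inter sx (PySem.Set.ofList y)).length : Int))).foldl max 0) 0

def split_joint_distance_alt (A : List (List Int)) (B : List (List Int)) : Int :=
  let n : Int := (A.map (fun a => (a.length : Int))).sum
  2 * n - pvProj A B - pvProj B A

-- ===== PRECONDITION & SPEC =====
def Spec_split_joint_distance (A : List (List Int)) (B : List (List Int)) (out : Int) : Prop := out = split_joint_distance_alt A B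
instance (A : List (List Int)) (B : List (List Int)) (out : Int) : Decidable (Spec_split_joint_distance A B out) := by unfold Spec_split_joint_distance; infer_instance

-- ===== CLAIM (what is proved, stated in full; the proofs are below) =====
def Claim_equal_split_joint_distance : Prop := ∀ (A : List (List Int)) (B : List (List Int)), Dom_split_joint_distance A B → Spec_split_joint_distance A B (split_joint_distance A B)

-- ===== LEMMAS AND PROOFS =====

-- the pairwise intersection (a set in a's order)
def pvIsec (a b : List Int) : List Int :=
  PySem.Set.inter (PySem.Set.ofList a) (PySem.Set.ofList b)

-- the list C that A builds
def pvC (A B : List (List Int)) : List (List Int) :=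
  A.flatMap (fun a => (B.filter (fun b => decide ((pvIsec a b).length ≠ 0))).map (pvIsec a))

lemma pvIsec_nodup (a b : List Int) : (pvIsec a b).Nodup :=
  PySem.Set.nodup_inter _ _ (PySem.Set.nodup_ofList a)

lemma mem_pvIsec {a b : List Int} {z : Int} : z ∈ pvIsec a b ↔ z ∈ a ∧ z ∈ b := by
  simp [pvIsec, PySem.Set.mem_inter, PySem.Set.mem_ofList]

lemma mem_pvC {A B : List (List Int)} {c : List Int} :
    c ∈ pvC A B ↔ ∃ a ∈ A, ∃ b ∈ B, (pvIsec a b).length ≠ 0 ∧ c = pvIsec a b := by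
  simp only [pvC, List.mem_flatMap, List.mem_map, List.mem_filter, decide_eq_true_eq]
  constructor
  · rintro ⟨a, ha, b, ⟨hb, hne⟩, rfl⟩; exact ⟨a, ha, b, hb, hne, rfl⟩
  · rintro ⟨a, ha, b, hb, hne, rfl⟩; exact ⟨a, ha, b, ⟨hb, hne⟩, rfl⟩

-- nodup + subset / same members ⇒ length comparisons
lemma pvLen_le {l1 l2 : List Int} (h1 : l1.Nodup) (hs : ∀ z, z ∈ l1 → z ∈ l2) :
    l1.length ≤ l2.length := by
  calc l1.length = l1.toFinset.card := (List.toFinset_card_of_nodup h1).symm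
    _ ≤ l2.toFinset.card := Finset.card_le_card (fun z hz => by
        simpa [List.mem_toFinset] using hs z (by simpa [List.mem_toFinset] using hz))
    _ ≤ l2.length := List.toFinset_card_le l2

lemma pvLen_eq {l1 l2 : List Int} (h1 : l1.Nodup) (h2 : l2.Nodup)
    (hs : ∀ z, z ∈ l1 ↔ z ∈ l2) : l1.length = l2.length :=
  le_antisymm (pvLen_le h1 fun z hz => (hs z).1 hz) (pvLen_le h2 fun z hz => (hs z).2 hz)

-- intersecting with an intersection can only shrink the overlap with either factor
lemma pvIsec_isec_le_right (s a b : List Int) :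
    (pvIsec s (pvIsec a b)).length ≤ (pvIsec s b).length := by
  refine pvLen_le (pvIsec_nodup _ _) (fun z hz => ?_)
  rcases mem_pvIsec.1 hz with ⟨hzs, hzab⟩
  exact mem_pvIsec.2 ⟨hzs, (mem_pvIsec.1 hzab).2⟩

lemma pvIsec_isec_le_left (s a b : List Int) :
    (pvIsec s (pvIsec a b)).length ≤ (pvIsec s a).length := by
  refine pvLen_le (pvIsec_nodup _ _) (fun z hz => ?_)
  rcases mem_pvIsec.1 hz with ⟨hzs, hzab⟩
  exact mem_pvIsec.2 ⟨hzs, (mem_pvIsec.1 hzab).1⟩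

lemma pvIsec_self_isec (a b : List Int) :
    (pvIsec a (pvIsec a b)).length = (pvIsec a b).length := by
  refine pvLen_eq (pvIsec_nodup _ _) (pvIsec_nodup _ _) (fun z => ?_)
  simp only [mem_pvIsec]; tauto

lemma pvIsec_comm_len (a b : List Int) :
    (pvIsec a b).length = (pvIsec b a).length := by
  refine pvLen_eq (pvIsec_nodup _ _) (pvIsec_nodup _ _) (fun z => ?_)
  simp only [mem_pvIsec]; tauto

lemma pvIsec_other_isec (b a : List Int) :
    (pvIsec b (pvIsec a b)).length = (pvIsec b a).length := by
  refine pvLen_eq (pvIsec_nodup _ _) (pvIsec_nodup _ _) (fun z => ?_)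
  simp only [mem_pvIsec]; tauto

-- the nested building loop produces (Σ len, pvC A B)
lemma pvInner_build (a : List Int) (B : List (List Int)) (st : Int × List (List Int)) :
    B.foldl (fun st b =>
      let set_a := PySem.Set.ofList a
      let set_b := PySem.Set.ofList b
      let isec := PySem.Set.inter set_a set_b
      if isec.length ≠ 0 then (st.1, st.2 ++ [isec]) else st) st
    = (st.1, st.2 ++ (B.filter (fun b => decide ((pvIsec a b).length ≠ 0))).map (pvIsec a)) := by
  induction B generalizing st with
  | nil => simp
  | cons b B ih =>
    simp only [List.foldl_cons, List.filter_cons]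
    by_cases h : (pvIsec a b).length ≠ 0
    · have hd : decide ((pvIsec a b).length ≠ 0) = true := by simp [h]
      rw [if_pos (by simpa [pvIsec] using h), ih, hd]
      simp [pvIsec]
    · have hd : decide ((pvIsec a b).length ≠ 0) = false := by simp [not_ne_iff.mp h]
      rw [if_neg (by simpa [pvIsec] using h), ih, hd]
      simp

lemma pvBuild (A B : List (List Int)) (st : Int × List (List Int)) :
    A.foldl (fun st a =>
      let st := (st.1 + (a.length : Int), st.2)
      B.foldl (fun st b =>
        let set_a := PySem.Set.ofList a
        let set_b := PySem.Set.ofList b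
        let isec := PySem.Set.inter set_a set_b
        if isec.length ≠ 0 then (st.1, st.2 ++ [isec]) else st) st) st
    = (st.1 + (A.map (fun a => (a.length : Int))).sum, st.2 ++ pvC A B) := by
  induction A generalizing st with
  | nil => simp [pvC]
  | cons a A ih =>
    simp only [List.foldl_cons]
    rw [pvInner_build, ih]
    simp [pvC, List.flatMap_cons, add_assoc]

-- foldl max bounds
lemma pvFoldl_max_le (L : List Int) (init K : Int) (h0 : init ≤ K) (h : ∀ z ∈ L, z ≤ K) :
    L.foldl max init ≤ K := by
  induction L generalizing init with
  | nil => simpa using h0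
  | cons z L ih =>
    simp only [List.foldl_cons]
    exact ih (max init z) (max_le h0 (h z (by simp))) (fun w hw => h w (by simp [hw]))

lemma pvInit_le_foldl_max (L : List Int) (init : Int) : init ≤ L.foldl max init := by
  induction L generalizing init with
  | nil => simp
  | cons z L ih => exact le_trans (le_max_left _ _) (ih (max init z))

lemma pvMem_le_foldl_max (L : List Int) (init : Int) : ∀ z ∈ L, z ≤ L.foldl max init := by
  induction L generalizing init with
  | nil => intro z hz; simp at hz
  | cons w L ih =>
    intro z hz
    simp only [List.foldl_cons]
    rcases List.mem_cons.1 hz with rfl | hz'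
    · exact le_trans (le_max_right _ _) (pvInit_le_foldl_max L (max init z))
    · exact ih (max init w) z hz'

-- the per-row maximum over C equals the per-row maximum over the other partition
lemma pvRow_max (C : List (List Int)) (Y : List (List Int)) (s : List Int)
    (hU : ∀ c ∈ C, ∃ y ∈ Y, (pvIsec s c).length ≤ (pvIsec s y).length)
    (hL : ∀ y ∈ Y, ((pvIsec s y).length : Int) = 0 ∨
          ∃ c ∈ C, ((pvIsec s y).length : Int) ≤ ((pvIsec s c).length : Int)) :
    C.foldl (fun m c =>
      let set_s := PySem.Set.ofList s
      let set_c := PySem.Set.ofList c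
      let isec := PySem.Set.inter set_s set_c
      if (isec.length : Int) > m then (isec.length : Int) else m) (0 : Int)
    = (Y.map (fun y => ((PySem.Set.inter (PySem.Set.ofList s) (PySem.Set.ofList y)).length : Int))).foldl max 0 := by
  have hshape : C.foldl (fun m c =>
      let set_s := PySem.Set.ofList s
      let set_c := PySem.Set.ofList c
      let isec := PySem.Set.inter set_s set_c
      if (isec.length : Int) > m then (isec.length : Int) else m) (0 : Int)
      = (C.map (fun c => ((pvIsec s c).length : Int))).foldl max 0 := by
    rw [List.foldl_map]
    exact PySem.List.foldl_congr_mem C _ _ 0 (fun m c _ => by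
      simp only [pvIsec]; omega)
  rw [hshape]
  have hY : (Y.map (fun y => ((PySem.Set.inter (PySem.Set.ofList s) (PySem.Set.ofList y)).length : Int))) = Y.map (fun y => ((pvIsec s y).length : Int)) := rfl
  rw [hY]
  apply le_antisymm
  · apply pvFoldl_max_le
    · exact pvInit_le_foldl_max _ 0
    · intro z hz
      rcases List.mem_map.1 hz with ⟨c, hc, rfl⟩
      rcases hU c hc with ⟨y, hy, hle⟩
      calc ((pvIsec s c).length : Int) ≤ ((pvIsec s y).length : Int) := by exact_mod_cast hle
        _ ≤ _ := pvMem_le_foldl_max _ 0 _ (List.mem_map.2 ⟨y, hy, rfl⟩)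
  · apply pvFoldl_max_le
    · exact pvInit_le_foldl_max _ 0
    · intro z hz
      rcases List.mem_map.1 hz with ⟨y, hy, rfl⟩
      rcases hL y hy with h0 | ⟨c, hc, hle⟩
      · rw [h0]; exact pvInit_le_foldl_max _ 0
      · exact le_trans hle (pvMem_le_foldl_max _ 0 _ (List.mem_map.2 ⟨c, hc, rfl⟩))

-- ofList c = c for c ∈ C lets pvIsec apply; the A-row instantiation
lemma pvRow_A (A B : List (List Int)) (a : List Int) (ha : a ∈ A) :
    (pvC A B).foldl (fun m c =>
      let set_a := PySem.Set.ofList a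
      let set_c := PySem.Set.ofList c
      let isec := PySem.Set.inter set_a set_c
      if (isec.length : Int) > m then (isec.length : Int) else m) (0 : Int)
    = (B.map (fun y => ((PySem.Set.inter (PySem.Set.ofList a) (PySem.Set.ofList y)).length : Int))).foldl max 0 := by
  apply pvRow_max
  · intro c hc
    rcases mem_pvC.1 hc with ⟨a', _, b, hb, _, rfl⟩
    exact ⟨b, hb, pvIsec_isec_le_right a a' b⟩
  · intro b hb
    by_cases h0 : (pvIsec a b).length = 0
    · left; exact_mod_cast h0
    · right
      refine ⟨pvIsec a b, mem_pvC.2 ⟨a, ha, b, hb, h0, rfl⟩, ?_⟩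
      have := pvIsec_self_isec a b
      exact le_of_eq (by exact_mod_cast this.symm)

-- the B-row instantiation
lemma pvRow_B (A B : List (List Int)) (b : List Int) (hb : b ∈ B) :
    (pvC A B).foldl (fun m c =>
      let set_b := PySem.Set.ofList b
      let set_c := PySem.Set.ofList c
      let isec := PySem.Set.inter set_b set_c
      if (isec.length : Int) > m then (isec.length : Int) else m) (0 : Int)
    = (A.map (fun y => ((PySem.Set.inter (PySem.Set.ofList b) (PySem.Set.ofList y)).length : Int))).foldl max 0 := by
  apply pvRow_max
  · intro c hc
    rcases mem_pvC.1 hc with ⟨a', ha', b', _, _, rfl⟩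
    exact ⟨a', ha', pvIsec_isec_le_left b a' b'⟩
  · intro a ha
    by_cases h0 : (pvIsec b a).length = 0
    · left; exact_mod_cast h0
    · right
      have hba : (pvIsec a b).length ≠ 0 := by
        rw [pvIsec_comm_len a b]; exact h0
      refine ⟨pvIsec a b, mem_pvC.2 ⟨a, ha, b, hb, hba, rfl⟩, ?_⟩
      have := pvIsec_other_isec b a
      exact le_of_eq (by exact_mod_cast this.symm)

-- ofList of a C element is itself (used implicitly: pvIsec s c already takes ofList c)

-- ===== VERDICT (by name: the statement is the Claim_ definition above) =====
theorem split_joint_distance_spec : Claim_equal_split_joint_distance := by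
  intro A B _
  unfold Spec_split_joint_distance split_joint_distance split_joint_distance_alt pvProj
  simp only
  rw [pvBuild]
  simp only [zero_add, List.nil_append]
  have hA : A.foldl (fun p a =>
      p + (pvC A B).foldl (fun m c =>
        let set_a := PySem.Set.ofList a
        let set_c := PySem.Set.ofList c
        let isec := PySem.Set.inter set_a set_c
        if (isec.length : Int) > m then (isec.length : Int) else m) (0 : Int)) (0 : Int)
      = A.foldl (fun total x =>
        total + ((B.map (fun y => ((PySem.Set.inter (PySem.Set.ofList x) (PySem.Set.ofList y)).length : Int))).foldl max 0)) 0 :=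
    PySem.List.foldl_congr_mem A _ _ 0 (fun p a ha => by rw [pvRow_A A B a ha])
  have hB : B.foldl (fun p b =>
      p + (pvC A B).foldl (fun m c =>
        let set_b := PySem.Set.ofList b
        let set_c := PySem.Set.ofList c
        let isec := PySem.Set.inter set_b set_c
        if (isec.length : Int) > m then (isec.length : Int) else m) (0 : Int)) (0 : Int)
      = B.foldl (fun total x =>
        total + ((A.map (fun y => ((PySem.Set.inter (PySem.Set.ofList x) (PySem.Set.ofList y)).length : Int))).foldl max 0)) 0 :=
    PySem.List.foldl_congr_mem B _ _ 0 (fun p b hb => by rw [pvRow_B A B b hb])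
  rw [hA, hB]
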